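-- pv_equiv track=rewrite | github.com/AgustinCB/contests | adventOfCode2021/problem16.py | build_candidates_dictionaries
-- ===== SOURCE A (Python) =====
-- def add_sequence_to_dictionary(dictionary: [set], sequence: str):
--     if len(sequence) == 2:
--         dictionary[1].add(sequence)
--     if len(sequence) == 3:
--         dictionary[7].add(sequence)
--     if len(sequence) == 4:
--         dictionary[4].add(sequence)
--     if len(sequence) == 5:
--         dictionary[2].add(sequence)
--         dictionary[3].add(sequence)
--         dictionary[5].add(sequence)
--     if len(sequence) == 6:
--         dictionary[0].add(sequence)
--         dictionary[6].add(sequence)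
--         dictionary[9].add(sequence)
--     if len(sequence) == 7:
--         dictionary[8].add(sequence)
--
-- def build_candidates_dictionaries(input: [([str], [str])]):
--     dictionaries = []
--     for (input_sequence, output_sequence) in input:
--         dictionary = [set() for _ in range(10)]
--         for sequence in input_sequence + output_sequence:
--             add_sequence_to_dictionary(dictionary, sequence)
--         dictionaries.append(dictionary)
--     return dictionaries
-- ===== SOURCE B (Python) =====
-- # For each digit, filter the combined sequence list by that digit's segment count.
-- SEGMENT_COUNTS = [6, 2, 5, 5, 4, 5, 6, 3, 7, 6]
--
-- def build_candidates_dictionaries(input):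
--     return [[{s for s in input_sequence + output_sequence if len(s) == n}
--              for n in SEGMENT_COUNTS]
--             for (input_sequence, output_sequence) in input]
-- ===== Notes on version B (the rewrite author's own statement) =====
-- stated objective: alternative
-- what changed: Inverts the traversal: instead of one pass over the sequences dispatching each into digit sets via length branches, B makes one pass per digit, building each digit's set as a comprehension filtering the combined sequence list by that digit's segment count.
import Mathlib
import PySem

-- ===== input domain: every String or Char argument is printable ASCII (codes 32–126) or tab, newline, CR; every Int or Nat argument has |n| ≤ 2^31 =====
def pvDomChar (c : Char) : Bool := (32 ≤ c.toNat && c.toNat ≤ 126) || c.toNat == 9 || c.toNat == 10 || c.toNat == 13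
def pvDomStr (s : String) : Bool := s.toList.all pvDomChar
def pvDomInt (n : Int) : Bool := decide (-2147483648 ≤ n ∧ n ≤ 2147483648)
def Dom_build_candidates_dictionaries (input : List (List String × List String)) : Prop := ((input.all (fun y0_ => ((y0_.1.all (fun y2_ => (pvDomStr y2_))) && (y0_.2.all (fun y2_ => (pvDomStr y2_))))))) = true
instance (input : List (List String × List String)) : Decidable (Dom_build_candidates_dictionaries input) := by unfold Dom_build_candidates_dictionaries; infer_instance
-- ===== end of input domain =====

-- B inverts the traversal: one filtering pass over the sequences per digit (keyed by the
-- digit's segment count) instead of dispatching each sequence into sets by length branches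
-- (objective: alternative; return values identical).

-- ===== PORT A =====
def add_sequence_to_dictionary (dictionary : List (PySem.Set String)) (sequence : String) : List (PySem.Set String) :=
  let d1 := if PySem.Str.len sequence = 2 then dictionary.modify 1 (fun s => PySem.Set.add s sequence) else dictionary
  let d2 := if PySem.Str.len sequence = 3 then d1.modify 7 (fun s => PySem.Set.add s sequence) else d1
  let d3 := if PySem.Str.len sequence = 4 then d2.modify 4 (fun s => PySem.Set.add s sequence) else d2
  let d4 := if PySem.Str.len sequence = 5 then
      ((d3.modify 2 (fun s => PySem.Set.add s sequence)).modify 3 (fun s => PySem.Set.add s sequence)).modify 5 (fun s => PySem.Set.add s sequence)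
    else d3
  let d5 := if PySem.Str.len sequence = 6 then
      ((d4.modify 0 (fun s => PySem.Set.add s sequence)).modify 6 (fun s => PySem.Set.add s sequence)).modify 9 (fun s => PySem.Set.add s sequence)
    else d4
  let d6 := if PySem.Str.len sequence = 7 then d5.modify 8 (fun s => PySem.Set.add s sequence) else d5
  d6

def build_candidates_dictionaries (input : List (List String × List String)) : List (List (List String)) :=
  input.foldl (fun dictionaries p =>
    let dictionary : List (PySem.Set String) := List.replicate 10 PySem.Set.empty
    let dictionary := (p.1 ++ p.2).foldl (fun d seq => add_sequence_to_dictionary d seq) dictionary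
    dictionaries ++ [dictionary]) []

-- ===== PORT B =====
def SEGMENT_COUNTS : List Int := [6, 2, 5, 5, 4, 5, 6, 3, 7, 6]

def build_candidates_dictionaries_alt (input : List (List String × List String)) : List (List (List String)) :=
  input.map (fun p =>
    SEGMENT_COUNTS.map (fun n =>
      PySem.Set.ofList ((p.1 ++ p.2).filter (fun s => PySem.Str.len s == n))))

-- ===== PRECONDITION & SPEC =====
def Spec_build_candidates_dictionaries (input : List (List String × List String)) (out : List (List (List String))) : Prop := out = build_candidates_dictionaries_alt input
instance (input : List (List String × List String)) (out : List (List (List String))) : Decidable (Spec_build_candidates_dictionaries input out) := by unfold Spec_build_candidates_dictionaries; infer_instance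

-- ===== CLAIM =====
def Claim_equal_build_candidates_dictionaries : Prop := ∀ (input : List (List String × List String)), Dom_build_candidates_dictionaries input → Spec_build_candidates_dictionaries input (build_candidates_dictionaries input)

-- ===== LEMMAS AND PROOFS =====

-- One A-step on a dictionary in "map g over SEGMENT_COUNTS" form stays in that form,
-- with the set for segment count n getting seq added exactly when len seq = n.
lemma step_map (g : Int → PySem.Set String) (seq : String) :
    add_sequence_to_dictionary (SEGMENT_COUNTS.map g) seq =
      SEGMENT_COUNTS.map (fun n => if PySem.Str.len seq == n then PySem.Set.add (g n) seq else g n) := by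
  by_cases h2 : seq.length = 2
  · simp [add_sequence_to_dictionary, SEGMENT_COUNTS, PySem.Str.len, h2, List.modify]
  by_cases h3 : seq.length = 3
  · simp [add_sequence_to_dictionary, SEGMENT_COUNTS, PySem.Str.len, h3, List.modify]
  by_cases h4 : seq.length = 4
  · simp [add_sequence_to_dictionary, SEGMENT_COUNTS, PySem.Str.len, h4, List.modify]
  by_cases h5 : seq.length = 5
  · simp [add_sequence_to_dictionary, SEGMENT_COUNTS, PySem.Str.len, h5, List.modify]
  by_cases h6 : seq.length = 6
  · simp [add_sequence_to_dictionary, SEGMENT_COUNTS, PySem.Str.len, h6, List.modify]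
  by_cases h7 : seq.length = 7
  · simp [add_sequence_to_dictionary, SEGMENT_COUNTS, PySem.Str.len, h7, List.modify]
  · have g2 : ¬((seq.length : Int) = 2) := by omega
    have g3 : ¬((seq.length : Int) = 3) := by omega
    have g4 : ¬((seq.length : Int) = 4) := by omega
    have g5 : ¬((seq.length : Int) = 5) := by omega
    have g6 : ¬((seq.length : Int) = 6) := by omega
    have g7 : ¬((seq.length : Int) = 7) := by omega
    simp [add_sequence_to_dictionary, SEGMENT_COUNTS, PySem.Str.len, g2, g3, g4, g5, g6, g7]

-- A's inner fold starting from "map g" equals, per segment count, folding Set.add over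
-- the sequences of that length (in order).
lemma fold_map (seqs : List String) (g : Int → PySem.Set String) :
    seqs.foldl (fun d seq => add_sequence_to_dictionary d seq) (SEGMENT_COUNTS.map g) =
      SEGMENT_COUNTS.map (fun n =>
        (seqs.filter (fun s => PySem.Str.len s == n)).foldl (fun t x => PySem.Set.add t x) (g n)) := by
  induction seqs generalizing g with
  | nil => simp
  | cons s rest ih =>
      simp only [List.foldl_cons, step_map]
      rw [ih]
      refine List.map_congr_left ?_
      intro n _
      by_cases h : (s.length : Int) = n
      · simp [PySem.Str.len, h]
      · simp [PySem.Str.len, h]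

-- Per pair: A's inner fold from the fresh dictionary equals B's per-digit filters.
lemma inner_eq (seqs : List String) :
    seqs.foldl (fun d seq => add_sequence_to_dictionary d seq)
        (List.replicate 10 (PySem.Set.empty (α := String))) =
      SEGMENT_COUNTS.map (fun n =>
        PySem.Set.ofList (seqs.filter (fun s => PySem.Str.len s == n))) := by
  have hrep : (List.replicate 10 (PySem.Set.empty (α := String))) =
      SEGMENT_COUNTS.map (fun _ => PySem.Set.empty) := by
    simp [SEGMENT_COUNTS, List.replicate]
  rw [hrep, fold_map]
  simp [PySem.Set.ofList_eq_foldl]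

-- A's outer fold with an arbitrary accumulator, in B's map form.
lemma outer_eq (l : List (List String × List String)) (acc : List (List (List String))) :
    l.foldl (fun dictionaries p =>
        dictionaries ++ [(p.1 ++ p.2).foldl (fun d seq => add_sequence_to_dictionary d seq)
          (List.replicate 10 PySem.Set.empty)]) acc =
      acc ++ l.map (fun p =>
        SEGMENT_COUNTS.map (fun n =>
          PySem.Set.ofList ((p.1 ++ p.2).filter (fun s => PySem.Str.len s == n)))) := by
  induction l generalizing acc with
  | nil => simp
  | cons q qrest ihq =>
      simp only [List.foldl_cons, List.map_cons]
      rw [ihq, inner_eq]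
      simp

-- ===== VERDICT =====
theorem build_candidates_dictionaries_spec : Claim_equal_build_candidates_dictionaries := by
  intro input _
  unfold Spec_build_candidates_dictionaries
  unfold build_candidates_dictionaries build_candidates_dictionaries_alt
  rw [outer_eq]
  simp
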